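-- pv_equiv track=rewrite | github.com/KrzysztofCwikla1/pp1 | 04-Subroutines/04/11.py | count_people_in_room
-- ===== SOURCE A (Python) =====
-- def count_people_in_room(detector):
--     count = 0
--     max_count = 0
--
--     for event in detector:
--         if event == '+':
--             count += 1
--             max_count = max(max_count, count)
--         elif event == '-':
--             count -= 1
--
--     return max_count >= 3
-- ===== SOURCE B (Python) =====
-- def count_people_in_room(detector):
--     # Divide and conquer: each segment reduces to (total delta, max prefix sum
--     # including the empty prefix); segments combine as a monoid:
--     # total = t1 + t2, maxpref = max(m1, t1 + m2). Room ever held >=3 people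
--     # iff the whole list's maxpref >= 3.
--     def solve(seg):
--         if not seg:
--             return (0, 0)
--         if len(seg) == 1:
--             d = 1 if seg[0] == '+' else (-1 if seg[0] == '-' else 0)
--             return (d, max(0, d))
--         mid = len(seg) // 2
--         t1, m1 = solve(seg[:mid])
--         t2, m2 = solve(seg[mid:])
--         return (t1 + t2, max(m1, t1 + m2))
--     return solve(detector)[1] >= 3
-- ===== Notes on version B (the rewrite author's own statement) =====
-- stated objective: alternative
-- what changed: B solves the task by divide-and-conquer: it recursively reduces each half of the list to a (total delta, max prefix sum) pair and combines the pairs with the monoid rule (t1+t2, max(m1, t1+m2)), instead of A's single left-to-right scan maintaining count/max_count.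
import Mathlib
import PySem

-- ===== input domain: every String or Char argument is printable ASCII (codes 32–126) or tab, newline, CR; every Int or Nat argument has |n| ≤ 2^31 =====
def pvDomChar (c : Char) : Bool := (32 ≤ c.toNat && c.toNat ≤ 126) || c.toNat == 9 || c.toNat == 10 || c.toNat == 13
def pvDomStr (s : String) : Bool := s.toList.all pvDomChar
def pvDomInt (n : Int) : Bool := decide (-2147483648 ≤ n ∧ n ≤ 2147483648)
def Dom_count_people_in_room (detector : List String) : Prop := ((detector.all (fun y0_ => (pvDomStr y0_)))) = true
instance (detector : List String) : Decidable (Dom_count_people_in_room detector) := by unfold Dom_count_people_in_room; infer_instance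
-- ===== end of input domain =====

-- B replaces A's left-to-right count/max_count scan by a divide-and-conquer reduction to (total delta, max prefix sum) pairs (alternative algorithm, same cost).

-- ===== PORT A =====
-- A's loop: state (count, max_count), max_count updated only on '+'.
def countA : List String → Int → Int → Int
  | [], _, m => m
  | e :: rest, c, m =>
    if e = "+" then countA rest (c + 1) (max m (c + 1))
    else if e = "-" then countA rest (c - 1) m
    else countA rest c m

def count_people_in_room (detector : List String) : Bool :=
  decide (countA detector 0 0 ≥ 3)

-- ===== PORT B =====
-- per-event delta, as in Source B's single-element base case
def deltaB (e : String) : Int := if e = "+" then 1 else if e = "-" then -1 else 0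

-- Source B's `solve`: split the segment at its midpoint, recurse, combine.
def solveB : List String → Int × Int
  | [] => (0, 0)
  | [e] => (deltaB e, max 0 (deltaB e))
  | e1 :: e2 :: rest =>
    let n := (e1 :: e2 :: rest).length / 2
    let p1 := solveB ((e1 :: e2 :: rest).take n)
    let p2 := solveB ((e1 :: e2 :: rest).drop n)
    (p1.1 + p2.1, max p1.2 (p1.1 + p2.2))
termination_by l => l.length
decreasing_by
  · simp; omega
  · simp; omega

def count_people_in_room_alt (detector : List String) : Bool :=
  decide ((solveB detector).2 ≥ 3)

-- ===== PRECONDITION & SPEC =====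
def Spec_count_people_in_room (detector : List String) (out : Bool) : Prop := out = count_people_in_room_alt detector
instance (detector : List String) (out : Bool) : Decidable (Spec_count_people_in_room detector out) := by unfold Spec_count_people_in_room; infer_instance

-- ===== CLAIM =====
def Claim_equal_count_people_in_room : Prop := ∀ (detector : List String), Dom_count_people_in_room detector → Spec_count_people_in_room detector (count_people_in_room detector)

-- ===== LEMMAS AND PROOFS =====

-- spec functions: total delta, and max prefix sum (including the empty prefix)
def totS : List String → Int
  | [] => 0
  | e :: rest => deltaB e + totS rest

def mprefS : List String → Int
  | [] => 0
  | e :: rest => max 0 (deltaB e + mprefS rest)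

theorem mprefS_nonneg (l : List String) : 0 ≤ mprefS l := by
  cases l with
  | nil => simp [mprefS]
  | cons e rest => simp [mprefS]

theorem totS_append (l1 l2 : List String) : totS (l1 ++ l2) = totS l1 + totS l2 := by
  induction l1 with
  | nil => simp [totS]
  | cons e rest ih => simp [totS, ih]; ring

theorem mprefS_append (l1 l2 : List String) :
    mprefS (l1 ++ l2) = max (mprefS l1) (totS l1 + mprefS l2) := by
  induction l1 with
  | nil =>
    have := mprefS_nonneg l2
    simp [mprefS, totS]
    omega
  | cons e rest ih =>
    simp [mprefS, totS, ih]
    omega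

theorem solveB_eq (l : List String) : solveB l = (totS l, mprefS l) := by
  fun_induction solveB l with
  | case1 => simp [totS, mprefS]
  | case2 e => simp [totS, mprefS]
  | case3 e1 e2 rest n p1 p2 ih2 ih1 =>
    simp only [p1, p2, ih1, ih2]
    have h := List.take_append_drop n (e1 :: e2 :: rest)
    conv_rhs => rw [← h]
    rw [totS_append, mprefS_append]

-- invariant of A's loop: for c ≤ m, the result is max m (c + mprefS l)
theorem countA_eq (l : List String) (c m : Int) (h : c ≤ m) :
    countA l c m = max m (c + mprefS l) := by
  induction l generalizing c m with
  | nil => simp [countA, mprefS]; omega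
  | cons e rest ih =>
    simp only [countA, mprefS]
    by_cases hp : e = "+"
    · rw [if_pos hp, ih (c + 1) (max m (c + 1)) (le_max_right _ _)]
      have := mprefS_nonneg rest
      simp [deltaB, hp]
      omega
    · by_cases hm : e = "-"
      · rw [if_neg hp, if_pos hm, ih (c - 1) m (by omega)]
        simp [deltaB, hm]
        omega
      · rw [if_neg hp, if_neg hm, ih c m h]
        have := mprefS_nonneg rest
        simp [deltaB, hp, hm]
        omega

-- ===== VERDICT =====
theorem count_people_in_room_spec : Claim_equal_count_people_in_room := by
  intro detector _
  unfold Spec_count_people_in_room count_people_in_room count_people_in_room_alt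
  rw [solveB_eq, countA_eq detector 0 0 le_rfl]
  have := mprefS_nonneg detector
  simp
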